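-- pv_equiv track=rewrite | github.com/Juunsik/Algorithm_Kata | Lv8/206.py | solution
-- ===== SOURCE A (Python) =====
-- def solution(arr):
--     stk = []
--     i = 0
--     while i < len(arr):
--         if stk:
--             if stk[-1] < arr[i]:
--                 stk.append(arr[i])
--                 i += 1
--             else:
--                 stk.pop()
--         else:
--             stk.append(arr[i])
--             i += 1
--     return stk
-- ===== SOURCE B (Python) =====
-- def solution(arr):
--     result = []
--     for x in reversed(arr):
--         if not result or x < result[-1]:
--             result.append(x)
--     result.reverse()
--     return result
-- ===== Notes on version B (the rewrite author's own statement) =====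
-- stated objective: simpler
-- what changed: Replaced A's left-to-right while-loop monotonic stack (push, or pop until the top is smaller) by a single right-to-left pass that keeps an element exactly when it is strictly below everything kept so far (the suffix minimum), then reverses.
import Mathlib
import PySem

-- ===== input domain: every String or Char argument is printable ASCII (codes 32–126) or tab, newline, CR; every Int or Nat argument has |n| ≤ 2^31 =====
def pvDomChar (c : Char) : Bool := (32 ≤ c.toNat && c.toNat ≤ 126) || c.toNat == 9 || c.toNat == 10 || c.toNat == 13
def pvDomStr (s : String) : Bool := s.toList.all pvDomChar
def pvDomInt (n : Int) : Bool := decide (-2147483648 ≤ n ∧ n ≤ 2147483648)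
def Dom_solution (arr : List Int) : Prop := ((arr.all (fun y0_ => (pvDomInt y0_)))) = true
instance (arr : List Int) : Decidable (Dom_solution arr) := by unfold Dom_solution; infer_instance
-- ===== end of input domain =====

-- B replaces A's while-loop monotonic stack (push / pop-until-smaller) by a single
-- reverse-pass suffix-minimum filter; objective: simpler (same linear cost).

-- ===== PORT A =====
-- A's stack is represented head = top (Python's stk[-1]); the final `return stk`
-- (bottom→top order) is therefore the reverse of this representation.
def loopA : List Int → List Int → List Int
  | stk, [] => stk
  | [], x :: rest => loopA [x] rest
  | t :: s, x :: rest =>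
      if t < x then loopA (x :: t :: s) rest
      else loopA s (x :: rest)
termination_by stk l => (l.length, stk.length)
decreasing_by
  · exact Prod.Lex.left _ _ (by simp)
  · exact Prod.Lex.left _ _ (by simp)
  · exact Prod.Lex.right _ (by simp)

def solution (arr : List Int) : List Int := (loopA [] arr).reverse

-- ===== PORT B =====
-- B's `result` is represented head = most recently appended (result[-1]); the final
-- `result.reverse()` therefore makes the returned value exactly this representation.
def bStep (res : List Int) (x : Int) : List Int :=
  match res with
  | [] => [x]
  | y :: _ => if x < y then x :: res else res

def solution_alt (arr : List Int) : List Int := arr.reverse.foldl bStep []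

-- ===== PRECONDITION & SPEC =====
def Spec_solution (arr : List Int) (out : List Int) : Prop := out = solution_alt arr
instance (arr : List Int) (out : List Int) : Decidable (Spec_solution arr out) := by unfold Spec_solution; infer_instance

-- ===== CLAIM (what is proved, stated in full; the proofs are below) =====
def Claim_equal_solution : Prop := ∀ (arr : List Int), Dom_solution arr → Spec_solution arr (solution arr)

-- ===== LEMMAS AND PROOFS =====

-- B as a right fold over arr.
def F (l : List Int) : List Int := l.foldr (fun x acc => bStep acc x) []

theorem solution_alt_eq_F (arr : List Int) : solution_alt arr = F arr := by
  simp [solution_alt, F, List.foldl_reverse]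

theorem F_cons (x : Int) (r : List Int) : F (x :: r) = bStep (F r) x := rfl

theorem F_nil_iff (l : List Int) : F l = [] ↔ l = [] := by
  cases l with
  | nil => simp [F]
  | cons x r =>
    constructor
    · intro h
      exfalso
      rw [F_cons] at h
      cases hFr : F r with
      | nil => rw [hFr] at h; simp [bStep] at h
      | cons y t =>
        rw [hFr] at h
        simp only [bStep] at h
        split at h <;> simp at h
    · intro h; simp at h

-- the head of F l is the minimum test: x is below every element of l iff x is below the head (or l empty)
theorem head_F (l : List Int) : ∀ (h : Int) (t : List Int), F l = h :: t →
    ∀ x : Int, ((∀ y ∈ l, x < y) ↔ x < h) := by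
  induction l with
  | nil => intro h t hF x; simp [F] at hF
  | cons y r ih =>
    intro h t hF x
    rw [F_cons] at hF
    cases hFr : F r with
    | nil =>
      have hr : r = [] := (F_nil_iff r).mp hFr
      subst hr
      rw [hFr] at hF
      simp only [bStep] at hF
      rw [List.cons.injEq] at hF
      obtain ⟨rfl, rfl⟩ := hF
      simp
    | cons h' t' =>
      rw [hFr] at hF
      by_cases hy : y < h'
      · -- keep: head is y, and y is below everything in r
        simp only [bStep, if_pos hy] at hF
        rw [List.cons.injEq] at hF
        obtain ⟨rfl, rfl⟩ := hF
        have hyr : ∀ z ∈ r, y < z := (ih h' t' hFr y).mpr hy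
        constructor
        · intro hall; exact hall y (by simp)
        · intro hxy
          intro z hz
          rcases List.mem_cons.mp hz with rfl | hz'
          · exact hxy
          · exact lt_trans hxy (hyr z hz')
      · -- drop: head unchanged, and the head is ≤ y
        simp only [bStep, if_neg hy] at hF
        rw [List.cons.injEq] at hF
        obtain ⟨rfl, rfl⟩ := hF
        have hir := ih h' t' hFr x
        constructor
        · intro hall; exact hir.mp (fun z hz => hall z (by simp [hz]))
        · intro hxh
          intro z hz
          rcases List.mem_cons.mp hz with rfl | hz'
          · exact lt_of_lt_of_le hxh (le_of_not_gt hy)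
          · exact hir.mpr hxh z hz'

theorem all_lt_bStep (l : List Int) (x : Int) (hall : ∀ y ∈ l, x < y) :
    bStep (F l) x = x :: F l := by
  cases hF : F l with
  | nil => simp [bStep]
  | cons h t => simp [bStep, (head_F l h t hF x).mp hall]

theorem not_all_lt_bStep (l : List Int) (x : Int) (hnall : ¬ ∀ y ∈ l, x < y) :
    bStep (F l) x = F l := by
  cases hF : F l with
  | nil =>
    exfalso
    apply hnall
    have : l = [] := (F_nil_iff l).mp hF
    subst this
    simp
  | cons h t => simp [bStep, (head_F l h t hF x).not.mp hnall]

theorem loopA_eq (stk l : List Int) (hps : List.Pairwise (· > ·) stk) :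
    loopA stk l = (F l).reverse ++ stk.filter (fun t => l.all (fun y => decide (t < y))) := by
  induction stk, l using loopA.induct with
  | case1 stk =>
    simp [loopA, F, List.filter_eq_self.mpr]
  | case2 x rest ih =>
    rw [loopA, ih (by simp), F_cons]
    by_cases hall : ∀ y ∈ rest, x < y
    · have hx : (rest.all (fun y => decide (x < y))) = true := by
        simpa [List.all_eq_true] using hall
      rw [all_lt_bStep rest x hall]
      simp [List.filter_cons, hx]
    · have hx : (rest.all (fun y => decide (x < y))) = false := by
        simpa [List.all_eq_true] using hall
      rw [not_all_lt_bStep rest x hall]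
      simp [List.filter_cons, hx]
  | case3 t s x rest htx ih =>
    have hub : ∀ u ∈ t :: s, u < x := by
      intro u hu
      rcases List.mem_cons.mp hu with rfl | hu'
      · exact htx
      · exact lt_trans (List.pairwise_cons.mp hps |>.1 u hu') htx
    have hps' : List.Pairwise (· > ·) (x :: t :: s) := by
      refine List.pairwise_cons.mpr ⟨?_, hps⟩
      intro u hu; exact hub u hu
    have hfilt : List.filter (fun u => (x :: rest).all (fun y => decide (u < y))) (t :: s)
        = List.filter (fun u => rest.all (fun y => decide (u < y))) (t :: s) := by
      apply List.filter_congr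
      intro u hu
      simp [hub u hu]
    rw [loopA, if_pos htx, ih hps', F_cons, hfilt]
    by_cases hall : ∀ y ∈ rest, x < y
    · have hx : (rest.all (fun y => decide (x < y))) = true := by
        simpa [List.all_eq_true] using hall
      rw [all_lt_bStep rest x hall]
      simp [List.filter_cons, hx]
    · have hx : (rest.all (fun y => decide (x < y))) = false := by
        simpa [List.all_eq_true] using hall
      rw [not_all_lt_bStep rest x hall]
      simp [List.filter_cons, hx]
  | case4 t s x rest htx ih =>
    rw [loopA, if_neg htx, ih (List.pairwise_cons.mp hps).2]
    have hx : (((x :: rest).all (fun y => decide (t < y)))) = false := by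
      simp
      intro h
      exact absurd h htx
    simp [List.filter_cons, hx]
    intro h
    exact absurd h htx

-- ===== VERDICT (by name: the statement is the Claim_ definition above) =====
theorem solution_spec : Claim_equal_solution := by
  intro arr _
  unfold Spec_solution solution
  rw [loopA_eq [] arr (by simp), solution_alt_eq_F]
  simp
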